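-- pv_equiv track=rewrite | github.com/ommadawn46/z3-picross-solver | picross_solver.py | generate_pretty_str
-- ===== SOURCE A (Python) =====
-- def generate_pretty_str(solution, v_problem, h_problem, margin):
--     """
--     解法からピクロス盤面を表す文字列を生成
--     """
--     sp = " " * margin
--
--     v_max = max(map(len, v_problem))
--     h_max = max(map(len, h_problem))
--
--     result = ""
--     for i in range(v_max):
--         result += (" " + sp) * h_max
--         for v_numbers in v_problem:
--             n_len = len(v_numbers)
--             if i + n_len >= v_max:
--                 result += f"{v_numbers[i + n_len - v_max]}" + sp
--             else:
--                 result += " " + sp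
--         result += "\n"
--
--     for y in range(len(h_problem)):
--         h_numbers = h_problem[y]
--         result += (" " + sp) * (h_max - len(h_numbers))
--         for h_number in h_numbers:
--             result += f"{h_number}" + sp
--
--         for x in range(len(v_problem)):
--             result += ("■" if solution[x][y] else "□") + sp
--         result += "\n"
--
--     return result
-- ===== SOURCE B (Python) =====
-- def generate_pretty_str(solution, v_problem, h_problem, margin):
--     sp = " " * margin
--     v_max = max(map(len, v_problem))
--     h_max = max(map(len, h_problem))
--     H = len(h_problem)
--     # Build the output COLUMN by column (each column is a top-to-bottom token list),
--     # then transpose with zip(*...) to render the rows.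
--     cols = []
--     for j in range(h_max):
--         cols.append([" "] * v_max +
--                     [str(h[j - h_max + len(h)]) if j + len(h) >= h_max else " "
--                      for h in h_problem])
--     for x, c in enumerate(v_problem):
--         cols.append([" "] * (v_max - len(c)) + [str(n) for n in c] +
--                     ["■" if solution[x][y] else "□" for y in range(H)])
--     return "".join("".join(t + sp for t in row) + "\n" for row in zip(*cols))
-- ===== Notes on version B (the rewrite author's own statement) =====
-- stated objective: alternative
-- what changed: B builds the board column by column (each left-label column and each picross column as a top-to-bottom token list, clues bottom-aligned above the cells) and renders by transposing with zip(*cols), instead of A's row-by-row string emission with per-cell offset arithmetic.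
import Mathlib
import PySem

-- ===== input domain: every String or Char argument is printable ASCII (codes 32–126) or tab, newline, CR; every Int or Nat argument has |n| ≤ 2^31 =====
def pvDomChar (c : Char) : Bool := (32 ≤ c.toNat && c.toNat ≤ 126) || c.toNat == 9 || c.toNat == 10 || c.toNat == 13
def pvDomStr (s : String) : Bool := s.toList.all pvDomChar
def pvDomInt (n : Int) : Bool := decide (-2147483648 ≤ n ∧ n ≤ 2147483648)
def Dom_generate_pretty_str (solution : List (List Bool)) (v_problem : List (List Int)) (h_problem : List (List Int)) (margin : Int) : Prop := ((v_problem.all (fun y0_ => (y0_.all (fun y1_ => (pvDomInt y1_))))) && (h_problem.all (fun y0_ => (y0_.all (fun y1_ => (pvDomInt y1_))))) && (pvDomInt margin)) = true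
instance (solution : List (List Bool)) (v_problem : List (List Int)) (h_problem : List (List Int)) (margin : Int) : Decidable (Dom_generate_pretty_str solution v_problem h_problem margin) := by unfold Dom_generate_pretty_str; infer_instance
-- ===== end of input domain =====

-- B builds the board COLUMN by column (left-label columns, then one token column per picross
-- column: its bottom-aligned clues followed by its cells) and renders by transposing with
-- zip(*cols), instead of A's row-by-row emission with per-cell offset arithmetic; alternative
-- decomposition, not faster.

-- ===== PORT A =====
-- The two nested loops of A, with sp / v_max / h_max already computed (strings are List Char;
-- unreachable defaults of pyGetD: the label index is always in range, and Pre_ excludes the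
-- inputs on which Python's solution[x][y] raises IndexError).
def pvA_main (solution : List (List Bool)) (v_problem : List (List Int)) (h_problem : List (List Int)) (sp : List Char) (v_max h_max : Int) : List Char :=
  let result : List Char := []
  let result := (PySem.List.pyRange 0 v_max).foldl (fun result i =>
      let result := result ++ PySem.List.pyRepeat (' ' :: sp) h_max
      let result := v_problem.foldl (fun result v_numbers =>
        let n_len : Int := (v_numbers.length : Int)
        if i + n_len ≥ v_max then
          result ++ (PySem.Int.toChars (PySem.List.pyGetD v_numbers (i + n_len - v_max) 0) ++ sp)
        else
          result ++ (' ' :: sp)) result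
      result ++ ['\n']) result
  let result := (PySem.List.pyRange 0 (h_problem.length : Int)).foldl (fun result y =>
      let h_numbers := PySem.List.pyGetD h_problem y []
      let result := result ++ PySem.List.pyRepeat (' ' :: sp) (h_max - (h_numbers.length : Int))
      let result := h_numbers.foldl (fun result h_number =>
        result ++ (PySem.Int.toChars h_number ++ sp)) result
      let result := (PySem.List.pyRange 0 (v_problem.length : Int)).foldl (fun result x =>
        result ++ ((if PySem.List.pyGetD (PySem.List.pyGetD solution x []) y false then '■' else '□') :: sp)) result
      result ++ ['\n']) result
  result

def generate_pretty_str (solution : List (List Bool)) (v_problem : List (List Int)) (h_problem : List (List Int)) (margin : Int) : String :=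
  let sp : List Char := PySem.List.pyRepeat [' '] margin
  let v_max : Int := (PySem.List.max? (v_problem.map (fun l => (l.length : Int))) (fun x => x)).getD 0
  let h_max : Int := (PySem.List.max? (h_problem.map (fun l => (l.length : Int))) (fun x => x)).getD 0
  String.ofList (pvA_main solution v_problem h_problem sp v_max h_max)

-- ===== PORT B =====
-- zip(*cols): repeatedly take the head of every column while all are nonempty (the headD
-- default [' '] is unreachable: it is read only when every column is nonempty).
def pvZipStar (cols : List (List (List Char))) : List (List (List Char)) :=
  if h : cols ≠ [] ∧ cols.all (fun c => !c.isEmpty) then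
    cols.map (fun c => c.headD [' ']) :: pvZipStar (cols.map List.tail)
  else []
termination_by (cols.headD []).length
decreasing_by
  obtain ⟨hne, hall⟩ := h
  cases cols with
  | nil => exact absurd rfl hne
  | cons c0 cs =>
    have h0 : !c0.isEmpty := List.all_eq_true.mp hall c0 (by simp)
    cases c0 with
    | nil => simp at h0
    | cons a t => simp

-- the token columns of Source B: h_max left-label columns, then one column per picross column
def pvB_cols (solution : List (List Bool)) (v_problem : List (List Int)) (h_problem : List (List Int)) (v_max h_max : Int) : List (List (List Char)) :=
  let leftCols := (PySem.List.pyRange 0 h_max).map (fun j =>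
    PySem.List.pyRepeat [([' '] : List Char)] v_max ++
      h_problem.map (fun h => if j + (h.length : Int) ≥ h_max
        then PySem.Int.toChars (PySem.List.pyGetD h (j - h_max + (h.length : Int)) 0) else [' ']))
  let boardCols := (PySem.List.enumerate v_problem).map (fun p =>
    PySem.List.pyRepeat [([' '] : List Char)] (v_max - (p.2.length : Int)) ++ p.2.map PySem.Int.toChars ++
      (PySem.List.pyRange 0 (h_problem.length : Int)).map (fun y =>
        [(if PySem.List.pyGetD (PySem.List.pyGetD solution p.1 []) y false then '■' else '□')]))
  leftCols ++ boardCols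

def pvB_main (solution : List (List Bool)) (v_problem : List (List Int)) (h_problem : List (List Int)) (sp : List Char) (v_max h_max : Int) : List Char :=
  let cols := pvB_cols solution v_problem h_problem v_max h_max
  ((pvZipStar cols).map (fun row => (row.map (fun t => t ++ sp)).flatten ++ ['\n'])).flatten

def generate_pretty_str_alt (solution : List (List Bool)) (v_problem : List (List Int)) (h_problem : List (List Int)) (margin : Int) : String :=
  let sp : List Char := PySem.List.pyRepeat [' '] margin
  let v_max : Int := (PySem.List.max? (v_problem.map (fun l => (l.length : Int))) (fun x => x)).getD 0
  let h_max : Int := (PySem.List.max? (h_problem.map (fun l => (l.length : Int))) (fun x => x)).getD 0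
  String.ofList (pvB_main solution v_problem h_problem sp v_max h_max)

-- ===== PRECONDITION & SPEC =====
-- Pre_ excludes exactly the inputs where Python A raises: max() on an empty v_problem/h_problem
-- (ValueError) and a solution too small for solution[x][y], x < len(v_problem), y < len(h_problem)
-- (IndexError).  B raises on the same inputs.
def Pre_generate_pretty_str (solution : List (List Bool)) (v_problem : List (List Int)) (h_problem : List (List Int)) (margin : Int) : Prop :=
  v_problem ≠ [] ∧ h_problem ≠ [] ∧ v_problem.length ≤ solution.length ∧
    ∀ row ∈ solution.take v_problem.length, h_problem.length ≤ row.length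
instance (solution : List (List Bool)) (v_problem : List (List Int)) (h_problem : List (List Int)) (margin : Int) : Decidable (Pre_generate_pretty_str solution v_problem h_problem margin) := by unfold Pre_generate_pretty_str; infer_instance

def pvWitness_generate_pretty_str : List (List Bool) × List (List Int) × List (List Int) × Int :=
  ([[true], [false]], [[1], [2]], [[2]], 1)

def Spec_generate_pretty_str (solution : List (List Bool)) (v_problem : List (List Int)) (h_problem : List (List Int)) (margin : Int) (out : String) : Prop := out = generate_pretty_str_alt solution v_problem h_problem margin
instance (solution : List (List Bool)) (v_problem : List (List Int)) (h_problem : List (List Int)) (margin : Int) (out : String) : Decidable (Spec_generate_pretty_str solution v_problem h_problem margin out) := by unfold Spec_generate_pretty_str; infer_instance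

-- ===== CLAIM (what is proved, stated in full; the proofs are below) =====
def Claim_equal_generate_pretty_str : Prop := ∀ (solution : List (List Bool)) (v_problem : List (List Int)) (h_problem : List (List Int)) (margin : Int), Dom_generate_pretty_str solution v_problem h_problem margin → Pre_generate_pretty_str solution v_problem h_problem margin → Spec_generate_pretty_str solution v_problem h_problem margin (generate_pretty_str solution v_problem h_problem margin)

-- ===== LEMMAS AND PROOFS =====

-- proof-side normal form: clue list c padded with blank tokens on the left to length m
def pvPad (m : Int) (c : List Int) : List (List Char) :=
  PySem.List.pyRepeat [[' ']] (m - (c.length : Int)) ++ c.map PySem.Int.toChars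

-- proof-side normal form: the output as a list of lines, each a list of tokens
def pvRows (solution : List (List Bool)) (v_problem : List (List Int)) (h_problem : List (List Int)) (sp : List Char) (v_max h_max : Int) : List Char :=
  let padded_cols := v_problem.map (pvPad v_max)
  let padded_rows := h_problem.map (pvPad h_max)
  let headerLines := (PySem.List.pyRange 0 v_max).map (fun i =>
      PySem.List.pyRepeat (' ' :: sp) h_max ++
        (padded_cols.map (fun col => PySem.List.pyGetD col i [' '] ++ sp)).flatten)
  let bodyLines := (PySem.List.enumerate padded_rows).map (fun p =>
      (p.2.map (fun tok => tok ++ sp)).flatten ++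
        ((PySem.List.pyRange 0 (v_problem.length : Int)).map (fun x =>
          (if PySem.List.pyGetD (PySem.List.pyGetD solution x []) p.1 false then '■' else '□') :: sp)).flatten)
  ((headerLines ++ bodyLines).map (fun l => l ++ ['\n'])).flatten

-- A's header branch for one column equals indexing into the padded column.
lemma pvPad_get (sp : List Char) (v_max i : Int) (c : List Int)
    (h0 : 0 ≤ i) (hi : i < v_max) (hc : (c.length : Int) ≤ v_max) :
    (if i + (c.length : Int) ≥ v_max then
        PySem.Int.toChars (PySem.List.pyGetD c (i + (c.length : Int) - v_max) 0) ++ sp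
      else (' ' :: sp))
    = PySem.List.pyGetD (pvPad v_max c) i [' '] ++ sp := by
  have hrhs : PySem.List.pyGetD (pvPad v_max c) i [' ']
      = (List.replicate (v_max - (c.length:Int)).toNat [' '] ++ c.map PySem.Int.toChars)[i.toNat]?.getD [' '] := by
    rw [PySem.List.pyGetD_of_nonneg _ _ h0]
    unfold pvPad
    rw [PySem.List.pyRepeat_singleton, List.getD_eq_getElem?_getD]
  rw [hrhs]
  by_cases h : i + (c.length : Int) ≥ v_max
  · rw [if_pos h]
    rw [List.getElem?_append_right (by simp only [List.length_replicate]; omega)]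
    have hlt : i.toNat - (List.replicate (v_max - (c.length:Int)).toNat ([' '] : List Char)).length < (c.map PySem.Int.toChars).length := by
      simp only [List.length_replicate, List.length_map]; omega
    rw [List.getElem?_eq_getElem hlt]
    simp only [List.getElem_map, Option.getD_some, List.length_replicate]
    rw [PySem.List.pyGetD_of_nonneg _ _ (by omega : (0:Int) ≤ i + (c.length : Int) - v_max)]
    rw [List.getD_eq_getElem?_getD, List.getElem?_eq_getElem (by omega)]
    simp only [Option.getD_some]
    have hidx : i.toNat - (v_max - (c.length:Int)).toNat = (i + (c.length : Int) - v_max).toNat := by omega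
    simp only [hidx]
  · rw [if_neg h]
    rw [List.getElem?_append_left (by simp only [List.length_replicate]; omega)]
    rw [List.getElem?_replicate_of_lt (by omega)]
    simp

-- A's two loops produce the rows normal form.
lemma pvA_eq_rows (solution : List (List Bool)) (v_problem h_problem : List (List Int))
    (sp : List Char) (v_max h_max : Int)
    (hcle : ∀ c ∈ v_problem, (c.length : Int) ≤ v_max) :
    pvA_main solution v_problem h_problem sp v_max h_max
      = pvRows solution v_problem h_problem sp v_max h_max := by
  simp only [pvA_main, pvRows]
  rw [PySem.List.enumerate_eq_map_pyRange _ (pvPad h_max [])]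
  rw [PySem.List.foldl_congr_mem _ _ (fun acc y => acc ++
      (PySem.List.pyRepeat (' ' :: sp) (h_max - ((PySem.List.pyGetD h_problem y []).length : Int)) ++
        ((PySem.List.pyGetD h_problem y []).flatMap (fun n => PySem.Int.toChars n ++ sp) ++
          ((PySem.List.pyRange 0 (v_problem.length : Int)).flatMap (fun x =>
            (if PySem.List.pyGetD (PySem.List.pyGetD solution x []) y false then '■' else '□') :: sp) ++ ['\n'])))) _ ?hb]
  case hb =>
    intro acc y _
    dsimp only
    rw [PySem.List.foldl_append_eq_flatMap, PySem.List.foldl_append_eq_flatMap]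
    simp [List.append_assoc]
  rw [PySem.List.foldl_append_eq_flatMap]
  rw [PySem.List.foldl_congr_mem _ _ (fun acc i => acc ++
      (PySem.List.pyRepeat (' ' :: sp) h_max ++
        (v_problem.flatMap (fun c => PySem.List.pyGetD (pvPad v_max c) i [' '] ++ sp) ++ ['\n']))) _ ?hh]
  case hh =>
    intro acc i hi
    dsimp only
    have hfg : ∀ (a : List Char), ∀ c ∈ v_problem,
        (if i + (c.length : Int) ≥ v_max then
            a ++ (PySem.Int.toChars (PySem.List.pyGetD c (i + (c.length : Int) - v_max) 0) ++ sp)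
          else a ++ (' ' :: sp))
        = a ++ (PySem.List.pyGetD (pvPad v_max c) i [' '] ++ sp) := by
      intro a c hc
      rw [PySem.List.mem_pyRange_one] at hi
      rw [← pvPad_get sp v_max i c hi.1 hi.2 (hcle c hc)]
      split <;> rfl
    rw [PySem.List.foldl_congr_mem _ _ _ _ hfg, PySem.List.foldl_append_eq_flatMap]
    simp [List.append_assoc]
  rw [PySem.List.foldl_append_eq_flatMap]
  simp only [List.map_append, List.flatten_append, List.map_map, ← List.flatMap_def,
    Function.comp_def, PySem.List.pyGetD_map, List.nil_append]
  simp only [PySem.List.len_eq, List.length_map]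
  simp [pvPad, PySem.List.pyRepeat, List.flatMap_append,
    List.flatMap_replicate, List.flatMap_map, List.append_assoc]

-- zip(*cols) on equal-length columns is the index transpose.
lemma pvZipStar_eq (n : Nat) : ∀ cols : List (List (List Char)), cols ≠ [] →
    (∀ c ∈ cols, c.length = n) →
    pvZipStar cols = (List.range n).map (fun i => cols.map (fun c => c.getD i [' '])) := by
  induction n with
  | zero =>
    intro cols hne hlen
    rw [pvZipStar]
    rw [dif_neg]
    · simp
    · rintro ⟨-, hall⟩
      obtain ⟨c0, hc0⟩ := List.exists_mem_of_ne_nil _ hne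
      have hb := List.all_eq_true.mp hall c0 hc0
      have h0 := hlen c0 hc0
      cases c0 with
      | nil => simp at hb
      | cons a t => simp at h0
  | succ n ih =>
    intro cols hne hlen
    have hall : cols.all (fun c => !c.isEmpty) := by
      rw [List.all_eq_true]
      intro c hc
      have hl := hlen c hc
      cases c with
      | nil => simp at hl
      | cons a t => simp
    rw [pvZipStar]
    rw [dif_pos ⟨hne, hall⟩]
    rw [ih (cols.map List.tail) (by simpa using hne) ?tl]
    case tl =>
      intro c hc
      obtain ⟨c', hc', rfl⟩ := List.mem_map.mp hc
      have hl := hlen c' hc'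
      simp [hl]
    · rw [List.range_succ_eq_map]
      simp only [List.map_cons, List.map_map, Function.comp_def]
      congr 1
      · apply List.map_congr_left
        intro c hc
        have hl := hlen c hc
        cases c with
        | nil => simp at hl
        | cons a t => simp
      · apply List.map_congr_left
        intro i _
        apply List.map_congr_left
        intro c hc
        have hl := hlen c hc
        cases c with
        | nil => simp at hl
        | cons a t => simp [Nat.succ_eq_add_one]

-- length of the clue-list padding: (pvPad m c).length = m.toNat
lemma pvPad_length (m : Int) (c : List Int) (hm : 0 ≤ m) (hc : (c.length:Int) ≤ m) :
    (pvPad m c).length = m.toNat := by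
  simp only [pvPad, PySem.List.pyRepeat_singleton, List.length_append, List.length_replicate,
    List.length_map]
  omega

-- the left-label token comprehension of a body row IS the padded clue list
lemma pvPad_tokens (m : Int) (c : List Int) (hm : 0 ≤ m) (hc : (c.length:Int) ≤ m) :
    (PySem.List.pyRange 0 m).map (fun j => if j + (c.length:Int) ≥ m
        then PySem.Int.toChars (PySem.List.pyGetD c (j - m + (c.length:Int)) 0) else ([' '] : List Char))
      = pvPad m c := by
  apply List.ext_getElem
  · rw [List.length_map, PySem.List.length_pyRange_one, pvPad_length m c hm hc]
    simp
  · intro k h1 h2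
    rw [List.getElem_map, PySem.List.getElem_pyRange_one]
    have hk : (k:Int) < m := by
      rw [List.length_map, PySem.List.length_pyRange_one] at h1; omega
    have hidx : (0:Int) + (k:Int) - m + (c.length:Int) = (0 + (k:Int)) + (c.length:Int) - m := by ring
    rw [hidx]
    have hg := pvPad_get [] m (0 + (k:Int)) c (by omega) (by omega) hc
    simp only [List.append_nil] at hg
    rw [hg]
    rw [zero_add, PySem.List.pyGetD_natCast]
    rw [List.getD_eq_getElem _ _ h2]

-- the token columns are nonempty (v_problem is) and all of the same height
lemma pvB_cols_ne (solution : List (List Bool)) (v_problem h_problem : List (List Int))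
    (v_max h_max : Int) (hV : v_problem ≠ []) :
    pvB_cols solution v_problem h_problem v_max h_max ≠ [] := by
  simp only [pvB_cols]
  intro hEq
  rcases List.append_eq_nil_iff.mp hEq with ⟨-, h2⟩
  rw [List.map_eq_nil_iff] at h2
  cases v_problem with
  | nil => exact hV rfl
  | cons a t => simp [PySem.List.enumerate_cons] at h2

lemma pvB_cols_len (solution : List (List Bool)) (v_problem h_problem : List (List Int))
    (v_max h_max : Int) (hvm : 0 ≤ v_max) (hvle : ∀ c ∈ v_problem, (c.length : Int) ≤ v_max) :
    ∀ c ∈ pvB_cols solution v_problem h_problem v_max h_max,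
      c.length = v_max.toNat + h_problem.length := by
  intro c hc
  simp only [pvB_cols, List.mem_append] at hc
  rcases hc with hc | hc
  · obtain ⟨j, hj, rfl⟩ := List.mem_map.mp hc
    simp [PySem.List.pyRepeat_singleton]
  · obtain ⟨p, hp, rfl⟩ := List.mem_map.mp hc
    obtain ⟨k, hk, rfl⟩ := (PySem.List.mem_enumerate_iff _ _ _).mp hp
    have hle := hvle _ (List.getElem_mem hk)
    simp only [List.length_append, List.length_map, List.length_replicate,
      PySem.List.pyRepeat_singleton, PySem.List.length_pyRange_one]
    omega

-- the output rows, as lists of tokens (proof-side normal form)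
def pvTokRows (solution : List (List Bool)) (v_problem : List (List Int)) (h_problem : List (List Int)) (v_max h_max : Int) : List (List (List Char)) :=
  (PySem.List.pyRange 0 v_max).map (fun i =>
      List.replicate h_max.toNat ([' '] : List Char) ++
        (v_problem.map (pvPad v_max)).map (fun col => PySem.List.pyGetD col i [' ']))
    ++ (PySem.List.enumerate (h_problem.map (pvPad h_max))).map (fun p =>
      p.2 ++ (PySem.List.pyRange 0 (v_problem.length : Int)).map (fun x =>
        [(if PySem.List.pyGetD (PySem.List.pyGetD solution x []) p.1 false then '■' else '□')]))

-- rendering the token rows (join each token with sp, newline after each row) gives pvRows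
lemma pvRows_eq_render (solution : List (List Bool)) (v_problem h_problem : List (List Int))
    (sp : List Char) (v_max h_max : Int) :
    pvRows solution v_problem h_problem sp v_max h_max
      = ((pvTokRows solution v_problem h_problem v_max h_max).map
          (fun row => (row.map (fun t => t ++ sp)).flatten ++ ['\n'])).flatten := by
  simp only [pvRows, pvTokRows]
  simp [List.map_append, List.flatten_append, List.map_map, Function.comp_def,
    PySem.List.pyRepeat, List.map_replicate, List.append_assoc]

-- the transposed columns, row by row, are exactly the token rows
lemma pvCols_rows (solution : List (List Bool)) (v_problem h_problem : List (List Int))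
    (v_max h_max : Int) (hvm : 0 ≤ v_max) (hhm : 0 ≤ h_max)
    (hvle : ∀ c ∈ v_problem, (c.length : Int) ≤ v_max)
    (hhle : ∀ r ∈ h_problem, (r.length : Int) ≤ h_max) :
    (List.range (v_max.toNat + h_problem.length)).map
        (fun i => (pvB_cols solution v_problem h_problem v_max h_max).map (fun c => c.getD i [' ']))
      = pvTokRows solution v_problem h_problem v_max h_max := by
  rw [List.range_add, List.map_append]
  simp only [pvTokRows]
  congr 1
  · -- header rows (one per clue line of the column labels)
    rw [PySem.List.pyRange_one 0 v_max]
    simp only [Int.sub_zero]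
    rw [List.map_map]
    apply List.map_congr_left
    intro k hk
    rw [List.mem_range] at hk
    simp only [Function.comp_def, zero_add, PySem.List.pyGetD_natCast]
    simp only [pvB_cols, List.map_append]
    congr 1
    · -- the h_max left-label columns all contribute a blank token
      rw [List.map_map]
      rw [show List.replicate h_max.toNat ([' '] : List Char)
            = (PySem.List.pyRange 0 h_max).map (fun _ => ([' '] : List Char)) by
          rw [List.map_const', PySem.List.length_pyRange_one]; simp]
      apply List.map_congr_left
      intro j _
      simp only [Function.comp_def, PySem.List.pyRepeat_singleton]
      rw [List.getD_append _ _ _ _ (by simp only [List.length_replicate]; omega)]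
      exact List.getD_replicate _ (by omega)
    · -- the board columns contribute their padded clue tokens
      rw [List.map_map, List.map_map]
      conv_rhs => rw [← PySem.List.map_snd_enumerate v_problem 0, List.map_map]
      apply List.map_congr_left
      intro p hp
      obtain ⟨kk, hkk, rfl⟩ := (PySem.List.mem_enumerate_iff _ _ _).mp hp
      simp only [Function.comp_def]
      have hpv : PySem.List.pyRepeat [([' '] : List Char)] (v_max - ((v_problem[kk].length : Nat) : Int)) ++
          v_problem[kk].map PySem.Int.toChars = pvPad v_max v_problem[kk] := rfl
      rw [hpv]
      rw [List.getD_append _ _ _ _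
        (by rw [pvPad_length _ _ hvm (hvle _ (List.getElem_mem hkk))]; omega)]
  · -- body rows (one per picross row)
    rw [PySem.List.enumerate_eq_map_pyRange _ (pvPad h_max [])]
    simp only [PySem.List.len_eq, List.length_map]
    rw [PySem.List.pyRange_one 0 (h_problem.length : Int)]
    simp only [Int.sub_zero, Int.toNat_natCast]
    rw [List.map_map, List.map_map, List.map_map]
    apply List.map_congr_left
    intro y hy
    rw [List.mem_range] at hy
    simp only [Function.comp_def, zero_add, PySem.List.pyGetD_map, PySem.List.pyGetD_natCast]
    rw [List.getD_eq_getElem _ _ (by omega : y < h_problem.length)]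
    simp only [pvB_cols, List.map_append]
    congr 1
    · -- left: the label columns give the padded clue row
      rw [List.map_map]
      rw [← pvPad_tokens h_max h_problem[y] hhm (hhle _ (List.getElem_mem hy))]
      apply List.map_congr_left
      intro j _
      simp only [Function.comp_def, PySem.List.pyRepeat_singleton]
      rw [List.getD_append_right _ _ _ _ (by simp only [List.length_replicate]; omega)]
      simp only [List.length_replicate, Nat.add_sub_cancel_left]
      rw [List.getD_eq_getElem _ _ (by simp only [List.length_map]; omega)]
      rw [List.getElem_map]
    · -- right: the board columns give this row's cells
      rw [List.map_map]
      rw [PySem.List.enumerate_eq_map_pyRange v_problem ([] : List Int), List.map_map]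
      simp only [PySem.List.len_eq]
      apply List.map_congr_left
      intro x hx
      rw [PySem.List.mem_pyRange_one] at hx
      simp only [Function.comp_def]
      have hpv : PySem.List.pyRepeat [([' '] : List Char)] (v_max - (((PySem.List.pyGetD v_problem x []).length : Nat) : Int)) ++
          (PySem.List.pyGetD v_problem x []).map PySem.Int.toChars = pvPad v_max (PySem.List.pyGetD v_problem x []) := rfl
      have hmem : PySem.List.pyGetD v_problem x [] ∈ v_problem := by
        rw [PySem.List.pyGetD_of_nonneg _ _ hx.1,
          List.getD_eq_getElem _ _ (by omega : x.toNat < v_problem.length)]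
        exact List.getElem_mem _
      have hpl : (pvPad v_max (PySem.List.pyGetD v_problem x [])).length = v_max.toNat :=
        pvPad_length _ _ hvm (hvle _ hmem)
      rw [hpv, List.getD_append_right _ _ _ _ (by rw [hpl]; omega), hpl]
      simp only [Nat.add_sub_cancel_left]
      rw [List.getD_eq_getElem _ _
        (by simp only [List.length_map, PySem.List.length_pyRange_one]; omega)]
      rw [List.getElem_map, PySem.List.getElem_pyRange_one]
      simp

-- B's column construction followed by the transpose produces the rows normal form.
lemma pvB_eq_rows (solution : List (List Bool)) (v_problem h_problem : List (List Int))
    (sp : List Char) (v_max h_max : Int)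
    (hV : v_problem ≠ []) (hvm : 0 ≤ v_max) (hhm : 0 ≤ h_max)
    (hvle : ∀ c ∈ v_problem, (c.length : Int) ≤ v_max)
    (hhle : ∀ r ∈ h_problem, (r.length : Int) ≤ h_max) :
    pvB_main solution v_problem h_problem sp v_max h_max
      = pvRows solution v_problem h_problem sp v_max h_max := by
  simp only [pvB_main]
  rw [pvZipStar_eq (v_max.toNat + h_problem.length) _
      (pvB_cols_ne solution v_problem h_problem v_max h_max hV)
      (pvB_cols_len solution v_problem h_problem v_max h_max hvm hvle)]
  rw [pvCols_rows solution v_problem h_problem v_max h_max hvm hhm hvle hhle]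
  exact (pvRows_eq_render solution v_problem h_problem sp v_max h_max).symm

-- ===== VERDICT (by name: the statement is the Claim_ definition above) =====
theorem generate_pretty_str_spec : Claim_equal_generate_pretty_str := by
  intro solution v_problem h_problem margin _hDom hPre
  obtain ⟨hv, hh, _hs, _hr⟩ := hPre
  unfold Spec_generate_pretty_str generate_pretty_str generate_pretty_str_alt
  obtain ⟨m, hm⟩ : ∃ m, PySem.List.max? (v_problem.map (fun l => (l.length : Int))) (fun x => x) = some m := by
    cases h : PySem.List.max? (v_problem.map (fun l => (l.length : Int))) (fun x => x) with
    | none => exact absurd (by simpa using (PySem.List.max?_eq_none_iff _ _).mp h) hv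
    | some m => exact ⟨m, rfl⟩
  obtain ⟨mh, hmh⟩ : ∃ mh, PySem.List.max? (h_problem.map (fun l => (l.length : Int))) (fun x => x) = some mh := by
    cases h : PySem.List.max? (h_problem.map (fun l => (l.length : Int))) (fun x => x) with
    | none => exact absurd (by simpa using (PySem.List.max?_eq_none_iff _ _).mp h) hh
    | some mh => exact ⟨mh, rfl⟩
  have hcle : ∀ c ∈ v_problem, (c.length : Int) ≤ m := by
    intro c hcmem
    simpa using PySem.List.max?_isMax hm _ (List.mem_map_of_mem hcmem)
  have hhle : ∀ r ∈ h_problem, (r.length : Int) ≤ mh := by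
    intro r hrmem
    simpa using PySem.List.max?_isMax hmh _ (List.mem_map_of_mem hrmem)
  have hvm : 0 ≤ m := by
    obtain ⟨c0, hc0⟩ : ∃ c0, c0 ∈ v_problem := List.exists_mem_of_ne_nil _ hv
    exact le_trans (by positivity) (hcle c0 hc0)
  have hhm : 0 ≤ mh := by
    obtain ⟨r0, hr0⟩ : ∃ r0, r0 ∈ h_problem := List.exists_mem_of_ne_nil _ hh
    exact le_trans (by positivity) (hhle r0 hr0)
  rw [hm, hmh]
  exact congrArg String.ofList
    ((pvA_eq_rows solution v_problem h_problem _ _ _ hcle).trans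
      (pvB_eq_rows solution v_problem h_problem _ _ _ hv hvm hhm hcle hhle).symm)
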